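-- pv_equiv track=rewrite | github.com/joanarvs/ATP2022 | TPC6/tpc6.py | distAno
-- ===== SOURCE A (Python) =====
-- def distAno(obras):
--     dici = {}
--     for nome, _, ano, *_ in obras:
--         if ano in dici.keys():
--             dici[ano] = dici[ano] + 1
--         else:
--             dici[ano] = 1
--     return dici
-- ===== SOURCE B (Python) =====
-- def distAno(obras):
--     anos = [ano for nome, _, ano, *_ in obras]
--     return {ano: anos.count(ano) for ano in dict.fromkeys(anos)}
-- ===== Notes on version B (the rewrite author's own statement) =====
-- stated objective: simpler
-- what changed: Replaces the running-dictionary accumulation loop by a two-phase comprehension: extract the flat year list, deduplicate it in first-seen order with dict.fromkeys, and build each count with anos.count.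
import Mathlib
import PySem

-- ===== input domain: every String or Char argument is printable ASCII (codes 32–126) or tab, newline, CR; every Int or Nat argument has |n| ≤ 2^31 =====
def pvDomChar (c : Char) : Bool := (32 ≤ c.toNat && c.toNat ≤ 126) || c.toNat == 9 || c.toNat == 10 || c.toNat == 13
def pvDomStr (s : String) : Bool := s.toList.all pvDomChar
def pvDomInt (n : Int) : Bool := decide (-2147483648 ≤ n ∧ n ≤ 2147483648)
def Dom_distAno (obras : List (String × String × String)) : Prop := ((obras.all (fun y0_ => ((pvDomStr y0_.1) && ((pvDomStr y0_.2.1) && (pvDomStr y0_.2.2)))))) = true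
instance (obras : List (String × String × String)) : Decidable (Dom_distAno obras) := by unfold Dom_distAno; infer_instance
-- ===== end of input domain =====

-- B replaces A's running-dictionary loop by a simpler two-phase comprehension: dedup the years in first-seen order, then count each (not faster).

-- ===== PORT A =====
-- literal port of A: one pass, a dict updated in place ('ano in dici' → contains, dici[ano]+1 → getD under the contains guard)
def distAno (obras : List (String × String × String)) : List (String × Int) :=
  (obras.foldl (fun dici t =>
      if dici.contains t.2.2 then dici.insert t.2.2 (dici.getD t.2.2 0 + 1)
      else dici.insert t.2.2 1) (PySem.Dict.empty : PySem.Dict String Int)).items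

-- ===== PORT B =====
-- literal port of Source B: flat year list, dict.fromkeys dedup (= PySem.List.dedup), anos.count per key
def distAno_alt (obras : List (String × String × String)) : List (String × Int) :=
  let anos := obras.map (fun t => t.2.2)
  (PySem.List.dedup anos).map (fun ano => (ano, (PySem.List.count anos ano : Int)))

-- ===== PRECONDITION & SPEC =====
def Spec_distAno (obras : List (String × String × String)) (out : List (String × Int)) : Prop := out = distAno_alt obras
instance (obras : List (String × String × String)) (out : List (String × Int)) : Decidable (Spec_distAno obras out) := by unfold Spec_distAno; infer_instance

-- ===== CLAIM (what is proved, stated in full; the proofs are below) =====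
def Claim_equal_distAno : Prop := ∀ (obras : List (String × String × String)), Dom_distAno obras → Spec_distAno obras (distAno obras)

-- ===== LEMMAS AND PROOFS =====
-- A's branch collapses to the unconditional counter step: when the key is absent, getD gives 0.
theorem distAno_step_eq (d : PySem.Dict String Int) (a : String) :
    (if d.contains a then d.insert a (d.getD a 0 + 1) else d.insert a 1)
      = d.insert a (d.getD a 0 + 1) := by
  by_cases h : d.contains a = true
  · simp [h]
  · simp only [Bool.not_eq_true] at h
    rw [show d.getD a 0 = 0 from PySem.Dict.getD_of_not_contains d 0 h]
    simp [h]

-- ===== VERDICT (by name: the statement is the Claim_ definition above) =====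
theorem distAno_spec : Claim_equal_distAno := by
  intro obras _
  show distAno obras = distAno_alt obras
  unfold distAno distAno_alt
  have h1 : obras.foldl (fun dici t =>
      if dici.contains t.2.2 then dici.insert t.2.2 (dici.getD t.2.2 0 + 1)
      else dici.insert t.2.2 1) (PySem.Dict.empty : PySem.Dict String Int)
    = (obras.map (fun t => t.2.2)).foldl
        (fun d a => d.insert a (d.getD a 0 + 1)) PySem.Dict.empty := by
    rw [List.foldl_map]
    have hf : (fun (dici : PySem.Dict String Int) (t : String × String × String) =>
        if dici.contains t.2.2 then dici.insert t.2.2 (dici.getD t.2.2 0 + 1)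
        else dici.insert t.2.2 1)
      = fun dici t => dici.insert t.2.2 (dici.getD t.2.2 0 + 1) := by
      funext d t; exact distAno_step_eq d t.2.2
    rw [hf]
  rw [h1, PySem.Dict.foldl_insert_getD_add_one_eq_counter, PySem.Dict.items_counter]
  simp [PySem.List.dedup_eq_ofList, PySem.List.count_eq]
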